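-- pv_equiv track=rewrite | github.com/ChinoCribioli/MatasanoChallenge | Set1.py | base64_to_bits
-- ===== SOURCE A (Python) =====
-- oa = ord('a')
--
-- oz = ord('z')
--
-- oA = ord('A')
--
-- oZ = ord('Z')
--
-- o0 = ord('0')
--
-- o9 = ord('9')
--
-- def int_to_bits(n, size = 8): # the size parameter is to fill with leading zeroes if necessary
-- 	bits = []
-- 	while n > 0 :
-- 		bits.append(1 if n % 2 else 0)
-- 		n //= 2
-- 	while len(bits) < size :
-- 		bits.append(0)
-- 	return bits[::-1] # this is to reverse the string
--
-- def bits_to_int(bits):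
-- 	integer = 0
-- 	for c in bits:
-- 		integer *= 2
-- 		integer += c
-- 	return integer
--
-- def sixBits_to_base64(string):
-- 	index = bits_to_int(string)
-- 	if index < 26:
-- 		return chr(index+oA)
-- 	index -= 26
-- 	if index < 26:
-- 		return chr(index+oa)
-- 	index -= 26
-- 	if index < 10:
-- 		return chr(index+o0)
-- 	index -= 10
-- 	if index < 1:
-- 		return '+'
-- 	else :
-- 		return '/'
--
-- def bits_to_base64(bits):
-- 	answer = ""
-- 	for i in range(0,len(bits)//6):
-- 		answer += sixBits_to_base64(bits[6*i:6*(i+1)])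
-- 	return answer
--
-- def base64Char_to_int(char):
-- 	if char == '+':
-- 		return 62
-- 	if char == '/':
-- 		return 63
-- 	index = ord(char)
-- 	if index in range(oA,oZ+1):
-- 		return index-oA
-- 	if index in range(oa,oz+1):
-- 		return index-oa+26
-- 	if index in range(o0,o9+1):
-- 		return index-o0+52
--
-- def base64Char_to_bits(char):
-- 	return int_to_bits(base64Char_to_int(char),6)
--
-- def base64_to_bits(string):
-- 	bits = []
-- 	for c in string:
-- 		if c == '\n':
-- 			continue
-- 		if c == '=':
-- 			break
-- 		assert(c == bits_to_base64(base64Char_to_bits(c)))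
-- 		bits += base64Char_to_bits(c)
-- 	if string[-2:len(string)] == "==":
-- 		for i in range(1,5):
-- 			assert(bits[-i] == 0)
-- 		bits = bits[0:-4]
-- 	elif string[-1:len(string)] == "=":
-- 		for i in range(1,3):
-- 			assert(bits[-i] == 0)
-- 		bits = bits[0:-2]
-- 	return bits
-- ===== SOURCE B (Python) =====
-- _B64 = "ABCDEFGHIJKLMNOPQRSTUVWXYZabcdefghijklmnopqrstuvwxyz0123456789+/"
--
-- def base64_to_bits(string):
--     value = 0
--     count = 0
--     for c in string:
--         if c == '\n':
--             continue
--         if c == '=':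
--             break
--         value = value * 64 + _B64.index(c)
--         count += 1
--     if string.endswith("=="):
--         drop = 4
--     elif string.endswith("="):
--         drop = 2
--     else:
--         drop = 0
--     n = 6 * count - drop
--     v = value >> drop
--     bits = []
--     for _ in range(max(n, 0)):
--         bits.append(v & 1)
--         v >>= 1
--     bits.reverse()
--     return bits
-- ===== Notes on version B (the rewrite author's own statement) =====
-- stated objective: alternative
-- what changed: B replaces A's per-character 6-bit list building (helper chain int_to_bits/base64Char_to_bits with list concatenation) by a single integer accumulator (value = value*64 + index) plus one final bit-extraction pass, and replaces the bits[0:-4]/bits[0:-2] truncation by shifting the accumulator right before extraction.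
-- outside the precondition, e.g. on base64_to_bits('='): A raises IndexError, B returns []; on base64_to_bits('B='): A raises AssertionError, B returns [0, 0, 0, 0]; on base64_to_bits('$'): A raises TypeError, B raises ValueError
import Mathlib
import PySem

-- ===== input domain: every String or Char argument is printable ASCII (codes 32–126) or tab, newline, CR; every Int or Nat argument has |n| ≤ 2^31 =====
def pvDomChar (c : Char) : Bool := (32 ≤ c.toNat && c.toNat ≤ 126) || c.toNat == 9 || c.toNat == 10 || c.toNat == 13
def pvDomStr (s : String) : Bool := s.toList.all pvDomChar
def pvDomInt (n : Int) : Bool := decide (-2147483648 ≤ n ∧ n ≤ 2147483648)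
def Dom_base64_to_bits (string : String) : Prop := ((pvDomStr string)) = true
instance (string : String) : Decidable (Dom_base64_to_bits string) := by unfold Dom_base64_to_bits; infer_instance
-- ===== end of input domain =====

-- B replaces A's per-character 6-bit list concatenation by a single integer accumulator with
-- one final bit-extraction pass (alternative decomposition, same cost).

-- ===== PORT A =====
def oa : Int := ('a'.toNat : Int)
def oz : Int := ('z'.toNat : Int)
def oA : Int := ('A'.toNat : Int)
def oZ : Int := ('Z'.toNat : Int)
def o0 : Int := ('0'.toNat : Int)
def o9 : Int := ('9'.toNat : Int)

-- 'while n > 0: bits.append(1 if n % 2 else 0); n //= 2'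
def intToBitsCollect (n : Int) (bits : List Int) : List Int :=
  if _h : 0 < n then
    intToBitsCollect (PySem.Int.floordiv n 2) (bits ++ [if PySem.Int.mod n 2 ≠ 0 then (1 : Int) else 0])
  else bits
termination_by n.toNat
decreasing_by rw [PySem.Int.floordiv_eq_ediv_of_pos (by omega : (0:Int) < 2)]; omega

-- 'while len(bits) < size: bits.append(0)'
def intToBitsPad (bits : List Int) (size : Int) : List Int :=
  if h : (bits.length : Int) < size then intToBitsPad (bits ++ [0]) size else bits
termination_by (size - bits.length).toNat
decreasing_by simp only [List.length_append, List.length_cons, List.length_nil]; omega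

-- bits[::-1] is List.reverse (PySem.List.slice?_none_none_neg_one)
def int_to_bits (n : Int) (size : Int) : List Int :=
  (intToBitsPad (intToBitsCollect n []) size).reverse

def base64Char_to_int (char : Char) : Option Int :=
  if char = '+' then some 62
  else if char = '/' then some 63
  else
    let index : Int := (char.toNat : Int)
    if oA ≤ index ∧ index ≤ oZ then some (index - oA)
    else if oa ≤ index ∧ index ≤ oz then some (index - oa + 26)
    else if o0 ≤ index ∧ index ≤ o9 then some (index - o0 + 52)
    else none

-- none (an invalid char) makes Python's int_to_bits raise TypeError — excluded by Pre_
def base64Char_to_bits (char : Char) : List Int :=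
  int_to_bits ((base64Char_to_int char).getD 0) 6

-- the loop 'for c in string'; the assert 'c == bits_to_base64(base64Char_to_bits(c))' holds for
-- every alphabet char (exact round trip) and its inner call raises TypeError first on any other
-- char (excluded by Pre_), so it is value-neutral and carried as this comment
def aLoop : List Char → List Int → List Int
  | [], bits => bits
  | c :: rest, bits =>
    if c = '\n' then aLoop rest bits
    else if c = '=' then bits
    else aLoop rest (bits ++ base64Char_to_bits c)

def base64_to_bits (string : String) : List Int :=
  let bits := aLoop string.toList []
  if PySem.List.slice string.toList (some (-2)) (some (string.toList.length : Int)) = "==".toList then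
    -- 'for i in range(1,5): assert(bits[-i] == 0)' raises (IndexError/AssertionError) outside Pre_, value-neutral
    PySem.List.slice bits (some 0) (some (-4))
  else if PySem.List.slice string.toList (some (-1)) (some (string.toList.length : Int)) = "=".toList then
    -- 'for i in range(1,3): assert(bits[-i] == 0)' likewise
    PySem.List.slice bits (some 0) (some (-2))
  else bits

-- ===== PORT B =====
def bAlpha : List Char :=
  "ABCDEFGHIJKLMNOPQRSTUVWXYZabcdefghijklmnopqrstuvwxyz0123456789+/".toList

-- the scan: value = value*64 + _B64.index(c); count += 1  (.index raises ValueError outside Pre_)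
def bScan : List Char → Int → Int → Int × Int
  | [], v, c => (v, c)
  | ch :: rest, v, c =>
    if ch = '\n' then bScan rest v c
    else if ch = '=' then (v, c)
    else bScan rest (v * 64 + ((PySem.List.index? bAlpha ch).getD 0 : Int)) (c + 1)

-- 'bits.append(v & 1); v >>= 1' k times (v & 1 = v % 2, v >> 1 = v // 2, exact for every int)
def bExtract : Nat → Int → List Int → List Int
  | 0, _, bits => bits
  | k + 1, v, bits => bExtract k (PySem.Int.floordiv v 2) (bits ++ [PySem.Int.mod v 2])

def base64_to_bits_alt (string : String) : List Int :=
  let p := bScan string.toList 0 0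
  let drop : Int :=
    if PySem.Str.endswith string "==" then 4
    else if PySem.Str.endswith string "=" then 2
    else 0
  let n : Int := 6 * p.2 - drop
  -- v = value >> drop  (floor shift = floor division by 2^drop, exact)
  (bExtract (max n 0).toNat (PySem.Int.floordiv p.1 (2 ^ drop.toNat)) []).reverse

-- ===== PRECONDITION & SPEC =====
-- the characters A's loop actually decodes: before the first '=', with newlines skipped
def pvFiltered (cs : List Char) : List Char := (cs.takeWhile (· ≠ '=')).filter (· ≠ '\n')

def pvCharVal (c : Char) : Int := ((PySem.List.index? bAlpha c).getD 0 : Int)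

-- Pre_ excludes exactly the inputs where A raises: a non-alphabet character before the first '='
-- (TypeError), and '='-padding whose dropped bits are not all zero or with nothing decoded
-- (AssertionError / IndexError in A's assert loop).
def Pre_base64_to_bits (string : String) : Prop :=
  ((pvFiltered string.toList).all (fun c => bAlpha.contains c)) = true ∧
  (if PySem.Str.endswith string "==" then
     pvFiltered string.toList ≠ [] ∧ pvCharVal ((pvFiltered string.toList).getLast!) % 16 = 0
   else if PySem.Str.endswith string "=" then
     pvFiltered string.toList ≠ [] ∧ pvCharVal ((pvFiltered string.toList).getLast!) % 4 = 0
   else True)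
instance (string : String) : Decidable (Pre_base64_to_bits string) := by
  unfold Pre_base64_to_bits; infer_instance

def pvWitness_base64_to_bits : String := "TWFuZQ=="

def Spec_base64_to_bits (string : String) (out : List Int) : Prop := out = base64_to_bits_alt string
instance (string : String) (out : List Int) : Decidable (Spec_base64_to_bits string out) := by unfold Spec_base64_to_bits; infer_instance

-- ===== CLAIM (what is proved, stated in full; the proofs are below) =====
def Claim_equal_base64_to_bits : Prop := ∀ (string : String), Dom_base64_to_bits string → Pre_base64_to_bits string → Spec_base64_to_bits string (base64_to_bits string)

-- ===== LEMMAS AND PROOFS =====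

-- big-endian k-bit representation: the common value both loop shapes produce
def pvRep : Int → Nat → List Int
  | _, 0 => []
  | v, k + 1 => pvRep (v / 2) k ++ [v % 2]

theorem pvRep_length (v : Int) (k : Nat) : (pvRep v k).length = k := by
  induction k generalizing v with
  | zero => rfl
  | succ k ih => simp [pvRep, ih]

-- little-endian counterpart
def pvLepad : Int → Nat → List Int
  | _, 0 => []
  | v, k + 1 => v % 2 :: pvLepad (v / 2) k

theorem pvRep_reverse (v : Int) (k : Nat) : (pvRep v k).reverse = pvLepad v k := by
  induction k generalizing v with
  | zero => rfl
  | succ k ih => simp [pvRep, pvLepad, ih]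

theorem pvLepad_zero (k : Nat) : pvLepad 0 k = List.replicate k 0 := by
  induction k with
  | zero => rfl
  | succ k ih => simp [pvLepad, ih, List.replicate_succ]

theorem pvPad_spec (bits : List Int) (s : Int) :
    intToBitsPad bits s = bits ++ List.replicate (s - bits.length).toNat 0 := by
  fun_induction intToBitsPad bits s with
  | case1 bits h ih =>
    rw [ih]
    have hk : (s - (bits.length : Int)).toNat = (s - ((bits ++ [0]).length : Int)).toNat + 1 := by
      simp only [List.length_append, List.length_cons, List.length_nil]; push_cast; omega
    rw [hk, List.replicate_succ]; simp
  | case2 bits h =>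
    have hk : (s - (bits.length : Int)).toNat = 0 := by omega
    simp [hk]

theorem pvCollect_pad (j : Nat) : ∀ (v : Int) (bits : List Int), 0 ≤ v → v < 2 ^ j →
    intToBitsPad (intToBitsCollect v bits) ((bits.length + j : Nat) : Int) = bits ++ pvLepad v j := by
  induction j with
  | zero =>
    intro v bits h0 h1
    have hv : v = 0 := by omega
    subst hv
    rw [intToBitsCollect]
    simp [pvLepad, pvPad_spec]
  | succ j ih =>
    intro v bits h0 h1
    by_cases hv : 0 < v
    · rw [intToBitsCollect, dif_pos hv]
      rw [PySem.Int.floordiv_eq_ediv_of_pos (by omega : (0:Int) < 2),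
          PySem.Int.mod_eq_emod_of_pos (by omega : (0:Int) < 2)]
      have hbit : (if v % 2 ≠ 0 then (1 : Int) else 0) = v % 2 := by
        have : v % 2 = 0 ∨ v % 2 = 1 := by omega
        rcases this with h | h <;> simp [h]
      rw [hbit]
      have hlen : ((bits ++ [v % 2]).length + j : Nat) = (bits.length + (j + 1) : Nat) := by
        simp; omega
      have hdiv0 : 0 ≤ v / 2 := by omega
      have hdiv1 : v / 2 < 2 ^ j := by
        have h2 : (2:Int) ^ (j+1) = 2 ^ j * 2 := by ring
        rw [h2] at h1; omega
      have := ih (v / 2) (bits ++ [v % 2]) hdiv0 hdiv1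
      rw [hlen] at this
      rw [this, pvLepad]
      simp
    · have hv0 : v = 0 := by omega
      subst hv0
      rw [intToBitsCollect]
      simp only [lt_irrefl, dite_false]
      rw [pvPad_spec, pvLepad_zero]
      congr 1
      · congr 1; push_cast; omega

theorem pvIntToBits_eq (v : Int) (k : Nat) (h0 : 0 ≤ v) (h1 : v < 2 ^ k) :
    int_to_bits v (k : Int) = pvRep v k := by
  unfold int_to_bits
  have h := pvCollect_pad k v [] h0 h1
  simp only [List.length_nil, Nat.zero_add, List.nil_append] at h
  rw [h, ← pvRep_reverse, List.reverse_reverse]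

theorem pvBExtract_eq (k : Nat) : ∀ (v : Int) (bits : List Int),
    bExtract k v bits = bits ++ (pvRep v k).reverse := by
  induction k with
  | zero => intro v bits; simp [bExtract, pvRep]
  | succ k ih =>
    intro v bits
    rw [bExtract, PySem.Int.floordiv_eq_ediv_of_pos (by omega : (0:Int) < 2),
        PySem.Int.mod_eq_emod_of_pos (by omega : (0:Int) < 2), ih]
    simp [pvRep]

theorem pvRep_split (j : Nat) : ∀ (k : Nat) (w v : Int), 0 ≤ v → v < 2 ^ j →
    pvRep (w * 2 ^ j + v) (k + j) = pvRep w k ++ pvRep v j := by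
  induction j with
  | zero =>
    intro k w v h0 h1
    have hv : v = 0 := by omega
    subst hv
    simp [pvRep]
  | succ j ih =>
    intro k w v h0 h1
    have he : w * 2 ^ (j + 1) + v = (w * 2 ^ j) * 2 + v := by ring
    have h2 : (2:Int) ^ (j + 1) = 2 ^ j * 2 := by ring
    show pvRep (w * 2 ^ (j+1) + v) ((k + j) + 1) = _
    rw [pvRep, he]
    have hd : ((w * 2 ^ j) * 2 + v) / 2 = w * 2 ^ j + v / 2 := by omega
    have hm : ((w * 2 ^ j) * 2 + v) % 2 = v % 2 := by omega
    rw [hd, hm, ih k w (v / 2) (by omega) (by rw [h2] at h1; omega)]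
    rw [pvRep]
    simp

theorem pvRep_take (v : Int) (k j : Nat) :
    (pvRep v (k + j)).take k = pvRep (v / 2 ^ j) k := by
  have h2j : (0:Int) < 2 ^ j := by positivity
  have hm0 : 0 ≤ v % 2 ^ j := Int.emod_nonneg v (by omega)
  have hm1 : v % 2 ^ j < 2 ^ j := Int.emod_lt_of_pos v h2j
  have hv : v / 2 ^ j * 2 ^ j + v % 2 ^ j = v := by have := Int.ediv_mul_add_emod v (2 ^ j); omega
  calc (pvRep v (k + j)).take k
      = (pvRep (v / 2 ^ j * 2 ^ j + v % 2 ^ j) (k + j)).take k := by rw [hv]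
    _ = (pvRep (v / 2 ^ j) k ++ pvRep (v % 2 ^ j) j).take k := by
        rw [pvRep_split j k _ _ hm0 hm1]
    _ = pvRep (v / 2 ^ j) k := List.take_left' (pvRep_length _ _)

set_option maxRecDepth 4000 in
theorem pvCharFactsB : bAlpha.all (fun c =>
    ((base64Char_to_int c).getD 0 == ((PySem.List.index? bAlpha c).getD 0 : Int)) &&
    (decide ((PySem.List.index? bAlpha c).getD 0 < 64))) = true := by decide

theorem pvCharFacts : ∀ c ∈ bAlpha,
    (base64Char_to_int c).getD 0 = ((PySem.List.index? bAlpha c).getD 0 : Int) ∧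
    (PySem.List.index? bAlpha c).getD 0 < 64 := by
  have h := pvCharFactsB
  simp only [List.all_eq_true, Bool.and_eq_true, beq_iff_eq, decide_eq_true_eq] at h
  exact h

theorem pvFiltered_nl (rest : List Char) : pvFiltered ('\n' :: rest) = pvFiltered rest := by
  simp [pvFiltered]

theorem pvFiltered_pad (rest : List Char) : pvFiltered ('=' :: rest) = [] := by
  simp [pvFiltered]

theorem pvFiltered_cons (c : Char) (rest : List Char) (h1 : c ≠ '\n') (h2 : c ≠ '=') :
    pvFiltered (c :: rest) = c :: pvFiltered rest := by
  simp [pvFiltered, h1, h2]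

theorem pvScan_cnt : ∀ (cs : List Char) (v c : Int),
    (bScan cs v c).2 = c + ((pvFiltered cs).length : Int) := by
  intro cs
  induction cs with
  | nil => intro v c; simp [bScan, pvFiltered]
  | cons ch rest ih =>
    intro v c
    by_cases hn : ch = '\n'
    · subst hn; rw [show bScan ('\n' :: rest) v c = bScan rest v c from by simp [bScan]]
      rw [ih, pvFiltered_nl]
    · by_cases he : ch = '='
      · subst he
        rw [show bScan ('=' :: rest) v c = (v, c) from by simp [bScan, hn]]
        simp [pvFiltered_pad]
      · rw [show bScan (ch :: rest) v c
              = bScan rest (v * 64 + ((PySem.List.index? bAlpha ch).getD 0 : Int)) (c + 1) from by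
            simp [bScan, hn, he]]
        rw [ih, pvFiltered_cons ch rest hn he]
        simp [List.length_cons]; ring

theorem pvScan_main : ∀ (cs : List Char) (v : Int) (k : Nat) (c : Int),
    0 ≤ v → (∀ ch ∈ pvFiltered cs, ch ∈ bAlpha) →
    aLoop cs (pvRep v (6 * k)) = pvRep (bScan cs v c).1 (6 * k + 6 * (pvFiltered cs).length)
    ∧ 0 ≤ (bScan cs v c).1 := by
  intro cs
  induction cs with
  | nil => intro v k c hv _; simp [aLoop, bScan, pvFiltered]; exact hv
  | cons ch rest ih =>
    intro v k c hv hval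
    by_cases hn : ch = '\n'
    · subst hn
      rw [show aLoop ('\n' :: rest) (pvRep v (6 * k)) = aLoop rest (pvRep v (6 * k)) from by
            simp [aLoop],
          show bScan ('\n' :: rest) v c = bScan rest v c from by simp [bScan],
          pvFiltered_nl]
      exact ih v k c hv (by rw [pvFiltered_nl] at hval; exact hval)
    · by_cases he : ch = '='
      · subst he
        rw [show aLoop ('=' :: rest) (pvRep v (6 * k)) = pvRep v (6 * k) from by simp [aLoop, hn],
            show bScan ('=' :: rest) v c = (v, c) from by simp [bScan, hn],
            pvFiltered_pad]
        simpa using hv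
      · have hmem : ch ∈ bAlpha := by
          apply hval
          rw [pvFiltered_cons ch rest hn he]
          exact List.mem_cons_self
        obtain ⟨hcv, hlt⟩ := pvCharFacts ch hmem
        set w : Int := ((PySem.List.index? bAlpha ch).getD 0 : Int) with hw
        have hw0 : 0 ≤ w := Int.natCast_nonneg _
        have hw64 : w < 64 := by rw [hw]; exact_mod_cast hlt
        have hbits : base64Char_to_bits ch = pvRep w 6 := by
          unfold base64Char_to_bits
          rw [hcv]
          have h6 := pvIntToBits_eq w 6 hw0 (by norm_num; omega)
          exact_mod_cast h6
        have hstepA : aLoop (ch :: rest) (pvRep v (6 * k))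
            = aLoop rest (pvRep v (6 * k) ++ base64Char_to_bits ch) := by simp [aLoop, hn, he]
        have hstepB : bScan (ch :: rest) v c = bScan rest (v * 64 + w) (c + 1) := by
          simp only [bScan, if_neg hn, if_neg he, hw]
        have hjoin : pvRep v (6 * k) ++ pvRep w 6 = pvRep (v * 64 + w) (6 * (k + 1)) := by
          have h64 : (2:Int) ^ (6:Nat) = 64 := by norm_num
          have := pvRep_split 6 (6 * k) v w hw0 (by rw [h64]; exact hw64)
          rw [h64] at this
          rw [← this]
          congr 1
        have hval' : ∀ c2 ∈ pvFiltered rest, c2 ∈ bAlpha := by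
          intro c2 hc2
          exact hval c2 (by rw [pvFiltered_cons ch rest hn he]; exact List.mem_cons_of_mem _ hc2)
        obtain ⟨ihA, ihV⟩ := ih (v * 64 + w) (k + 1) (c + 1) (by omega) hval'
        constructor
        · rw [hstepA, hbits, hjoin, hstepB, ihA]
          congr 1
          rw [pvFiltered_cons ch rest hn he]
          simp
          omega
        · rw [hstepB]
          exact ihV

theorem pvCond2 (s : String) :
    (PySem.List.slice s.toList (some (-2)) (some (s.toList.length : Int)) = "==".toList)
    ↔ PySem.Str.endswith s "==" = true := by
  rw [show PySem.List.slice s.toList (some (-2)) (some (s.toList.length : Int))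
        = s.toList.drop (s.toList.length - 2) from by simp [PySem.List.slice]]
  rw [PySem.Str.endswith_eq, PySem.Chars.endswith_iff]
  constructor
  · intro h; rw [List.suffix_iff_eq_drop]; simpa using h.symm
  · intro h; rw [List.suffix_iff_eq_drop] at h; simpa using h.symm

theorem pvCond1 (s : String) :
    (PySem.List.slice s.toList (some (-1)) (some (s.toList.length : Int)) = "=".toList)
    ↔ PySem.Str.endswith s "=" = true := by
  rw [show PySem.List.slice s.toList (some (-1)) (some (s.toList.length : Int))
        = s.toList.drop (s.toList.length - 1) from by simp [PySem.List.slice]]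
  rw [PySem.Str.endswith_eq, PySem.Chars.endswith_iff]
  constructor
  · intro h; rw [List.suffix_iff_eq_drop]; simpa using h.symm
  · intro h; rw [List.suffix_iff_eq_drop] at h; simpa using h.symm

-- the common final step: take (6L-d) of the big-endian bits is extraction of value >> d
theorem pvFinal (V : Int) (L d : Nat) (hL : d ≤ 6 * L) :
    (pvRep V (6 * L)).take (6 * L - d) = pvRep (V / 2 ^ d) (6 * L - d) := by
  have := pvRep_take V (6 * L - d) d
  rw [show 6 * L - d + d = 6 * L from by omega] at this
  exact this

-- ===== VERDICT (by name: the statement is the Claim_ definition above) =====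
theorem base64_to_bits_spec : Claim_equal_base64_to_bits := by
  unfold Claim_equal_base64_to_bits
  intro string _ hpre
  unfold Spec_base64_to_bits
  obtain ⟨hvalB, hpad⟩ := hpre
  have hval : ∀ c ∈ pvFiltered string.toList, c ∈ bAlpha := by
    simpa only [List.all_eq_true, List.contains_iff_mem] using hvalB
  obtain ⟨hA, -⟩ := pvScan_main string.toList 0 0 0 le_rfl hval
  set L := (pvFiltered string.toList).length with hL
  set V := (bScan string.toList 0 0).1 with hV
  have hbits : aLoop string.toList [] = pvRep V (6 * L) := by simpa [pvRep] using hA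
  have hcnt : (bScan string.toList 0 0).2 = (L : Int) := by simpa using pvScan_cnt string.toList 0 0
  simp only [base64_to_bits, base64_to_bits_alt]
  rw [← hV, hbits, hcnt]
  by_cases h2 : PySem.Str.endswith string "==" = true
  · rw [if_pos ((pvCond2 string).mpr h2), if_pos h2]
    rw [if_pos h2] at hpad
    have hL1 : 1 ≤ L := by
      have := List.length_pos_iff.mpr hpad.1
      omega
    rw [PySem.List.slice_zero_start, PySem.List.slice_to_neg_ofNat _ 4 (by omega),
        pvRep_length, pvBExtract_eq]
    rw [show (max (6 * (L : Int) - 4) 0).toNat = 6 * L - 4 from by omega]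
    rw [show ((4:Int).toNat) = 4 from rfl,
        PySem.Int.floordiv_eq_ediv_of_pos (by norm_num : (0:Int) < 2 ^ (4:Nat))]
    rw [List.nil_append, List.reverse_reverse]
    exact pvFinal V L 4 (by omega)
  · rw [if_neg (fun h => h2 ((pvCond2 string).mp h)), if_neg h2]
    rw [if_neg h2] at hpad
    by_cases h1 : PySem.Str.endswith string "=" = true
    · rw [if_pos ((pvCond1 string).mpr h1), if_pos h1]
      rw [if_pos h1] at hpad
      have hL1 : 1 ≤ L := by
        have := List.length_pos_iff.mpr hpad.1
        omega
      rw [PySem.List.slice_zero_start, PySem.List.slice_to_neg_ofNat _ 2 (by omega),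
          pvRep_length, pvBExtract_eq]
      rw [show (max (6 * (L : Int) - 2) 0).toNat = 6 * L - 2 from by omega]
      rw [show ((2:Int).toNat) = 2 from rfl,
          PySem.Int.floordiv_eq_ediv_of_pos (by norm_num : (0:Int) < 2 ^ (2:Nat))]
      rw [List.nil_append, List.reverse_reverse]
      exact pvFinal V L 2 (by omega)
    · rw [if_neg (fun h => h1 ((pvCond1 string).mp h)), if_neg h1]
      rw [pvBExtract_eq]
      rw [show (max (6 * (L : Int) - 0) 0).toNat = 6 * L from by omega]
      rw [show ((0:Int).toNat) = 0 from rfl, pow_zero,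
          PySem.Int.floordiv_eq_ediv_of_pos (by norm_num : (0:Int) < 1), Int.ediv_one]
      simp
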